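-- pv_equiv track=rewrite | github.com/chayamy/week3 | bool pgia.py | check_bool_pgia
-- ===== SOURCE A (Python) =====
-- def check_bool_pgia(secret_number, play_number):
--     bool = 0
--     pgia = 0
--     for i in range(0, len(secret_number)):
--         if secret_number[i] == play_number[i]:
--             bool += 1
--         elif secret_number[i] in play_number:
--             pgia += 1
--     return (bool, pgia)
-- ===== SOURCE B (Python) =====
-- def check_bool_pgia(secret_number, play_number):
--     # Pass 1: exact matches (indexes play_number so a short play still raises IndexError).
--     exact = 0
--     for i in range(len(secret_number)):
--         if secret_number[i] == play_number[i]: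
--             exact += 1
--     # Pass 2: secrets present anywhere in the play; every exact position is also present,
--     # so pgia = present - exact.
--     present = 0
--     for i in range(len(secret_number)):
--         if secret_number[i] in play_number:
--             present += 1
--     return (exact, present - exact)
-- ===== Notes on version B (the rewrite author's own statement) =====
-- stated objective: alternative
-- what changed: Replaces A's single loop with branch-coupled counters by two independent counting passes (exact matches, then present-anywhere) and derives pgia = present - exact from the identity that every exact position is also present.
import Mathlib
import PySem

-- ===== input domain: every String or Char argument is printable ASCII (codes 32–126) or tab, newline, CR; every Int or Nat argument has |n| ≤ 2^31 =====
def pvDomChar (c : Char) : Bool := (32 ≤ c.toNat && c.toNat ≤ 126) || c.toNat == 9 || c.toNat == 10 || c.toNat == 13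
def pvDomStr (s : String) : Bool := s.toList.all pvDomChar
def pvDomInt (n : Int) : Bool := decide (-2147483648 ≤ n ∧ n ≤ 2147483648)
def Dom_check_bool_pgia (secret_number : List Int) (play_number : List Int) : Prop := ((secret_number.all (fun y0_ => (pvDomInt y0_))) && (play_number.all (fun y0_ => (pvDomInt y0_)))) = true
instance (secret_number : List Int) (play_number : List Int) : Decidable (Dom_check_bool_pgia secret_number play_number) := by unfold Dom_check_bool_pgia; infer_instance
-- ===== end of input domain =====

-- B is an alternative decomposition: two independent counting passes (exact matches, then
-- present-anywhere) with pgia = present - exact, instead of A's one loop with coupled branches.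

-- ===== PORT A =====
-- The three loop bodies, named for the induction.
def pvStepA (s p : List Int) (acc : Option (Int × Int)) (i : Int) : Option (Int × Int) :=
  acc.bind (fun bg =>
    match PySem.List.pyGet? s i, PySem.List.pyGet? p i with
    | some si, some pi =>
        if si == pi then some (bg.1 + 1, bg.2)
        else if p.contains si then some (bg.1, bg.2 + 1)
        else some (bg.1, bg.2)
    | _, _ => none)

def pvStepE (s p : List Int) (acc : Option Int) (i : Int) : Option Int :=
  acc.bind (fun e =>
    match PySem.List.pyGet? s i, PySem.List.pyGet? p i with
    | some si, some pi => some (if si == pi then e + 1 else e)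
    | _, _ => none)

def pvStepC (s p : List Int) (c : Int) (i : Int) : Int :=
  match PySem.List.pyGet? s i with
  | some si => if p.contains si then c + 1 else c
  | none => c


-- A's loop: for i in range(len(secret)): if s[i]==p[i]: bool+=1 elif s[i] in p: pgia+=1.
-- Option state = IndexError propagation (p[i] out of range ⇒ none, excluded by Pre_).
def check_bool_pgia (secret_number : List Int) (play_number : List Int) : List Int :=
  match (PySem.List.pyRange 0 (secret_number.length : Int) 1).foldl
      (pvStepA secret_number play_number) (some ((0 : Int), (0 : Int))) with
  | some (b, g) => [b, g]
  | none => []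

-- ===== PORT B =====
-- B: first pass counts exact matches (indexes play, Option state = IndexError);
-- second pass counts secrets present anywhere in play; returns (exact, present - exact).
def check_bool_pgia_alt (secret_number : List Int) (play_number : List Int) : List Int :=
  match (PySem.List.pyRange 0 (secret_number.length : Int) 1).foldl
      (pvStepE secret_number play_number) (some (0 : Int)) with
  | none => []
  | some exact =>
      let present : Int := (PySem.List.pyRange 0 (secret_number.length : Int) 1).foldl
        (pvStepC secret_number play_number) 0
      [exact, present - exact]

-- ===== PRECONDITION & SPEC =====
-- Pre_: play is at least as long as secret; otherwise both Pythons raise IndexError.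
def Pre_check_bool_pgia (secret_number : List Int) (play_number : List Int) : Prop :=
  secret_number.length ≤ play_number.length
instance (secret_number : List Int) (play_number : List Int) : Decidable (Pre_check_bool_pgia secret_number play_number) := by unfold Pre_check_bool_pgia; infer_instance

def pvWitness_check_bool_pgia : List Int × List Int := ([1, 2, 3], [3, 2, 9])

def Spec_check_bool_pgia (secret_number : List Int) (play_number : List Int) (out : List Int) : Prop := out = check_bool_pgia_alt secret_number play_number
instance (secret_number : List Int) (play_number : List Int) (out : List Int) : Decidable (Spec_check_bool_pgia secret_number play_number out) := by unfold Spec_check_bool_pgia; infer_instance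

-- ===== CLAIM (what is proved, stated in full; the proofs are below) =====
def Claim_equal_check_bool_pgia : Prop := ∀ (secret_number : List Int) (play_number : List Int), Dom_check_bool_pgia secret_number play_number → Pre_check_bool_pgia secret_number play_number → Spec_check_bool_pgia secret_number play_number (check_bool_pgia secret_number play_number)

-- ===== LEMMAS AND PROOFS =====

theorem pv_invariant (s p : List Int) (h : s.length ≤ p.length) :
    ∀ n, n ≤ s.length →
      ∃ e c : Int,
        ((List.range n).map (fun (k : Nat) => (k : Int))).foldl (pvStepA s p) (some (0, 0)) = some (e, c - e) ∧
        ((List.range n).map (fun (k : Nat) => (k : Int))).foldl (pvStepE s p) (some 0) = some e ∧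
        ((List.range n).map (fun (k : Nat) => (k : Int))).foldl (pvStepC s p) 0 = c := by
  intro n hn
  induction n with
  | zero => exact ⟨0, 0, by simp⟩
  | succ m ih =>
    obtain ⟨e, c, hA, hE, hC⟩ := ih (Nat.le_of_succ_le hn)
    have hms : m < s.length := hn
    have hmp : m < p.length := lt_of_lt_of_le hms h
    have hgs : PySem.List.pyGet? s (m : Int) = some s[m] := by
      rw [PySem.List.pyGet?_natCast]; exact List.getElem?_eq_getElem hms
    have hgp : PySem.List.pyGet? p (m : Int) = some p[m] := by
      rw [PySem.List.pyGet?_natCast]; exact List.getElem?_eq_getElem hmp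
    rw [List.range_succ, List.map_append, List.foldl_append, List.foldl_append,
      List.foldl_append, hA, hE, hC]
    simp only [List.map_cons, List.map_nil, List.foldl_cons, List.foldl_nil]
    by_cases heq : s[m] = p[m]
    · have hm : s[m] ∈ p := heq ▸ List.getElem_mem hmp
      refine ⟨e + 1, c + 1, ?_, ?_, ?_⟩
      · simp [pvStepA, hgs, hgp, heq]
      · simp [pvStepE, hgs, hgp, heq]
      · simp [pvStepC, hgs, hm]
    · by_cases hmem : s[m] ∈ p
      · refine ⟨e, c + 1, ?_, ?_, ?_⟩
        · simp [pvStepA, hgs, hgp, heq, hmem]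
          ring
        · simp [pvStepE, hgs, hgp, heq]
        · simp [pvStepC, hgs, hmem]
      · refine ⟨e, c, ?_, ?_, ?_⟩
        · simp [pvStepA, hgs, hgp, heq, hmem]
        · simp [pvStepE, hgs, hgp, heq]
        · simp [pvStepC, hgs, hmem]

theorem pv_range_cast (n : Nat) :
    PySem.List.pyRange 0 (n : Int) 1 = (List.range n).map (fun (k : Nat) => (k : Int)) := by
  exact PySem.List.pyRange_zero_natCast n

-- ===== VERDICT (by name: the statement is the Claim_ definition above) =====
theorem check_bool_pgia_spec : Claim_equal_check_bool_pgia := by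
  intro s p _ hpre
  unfold Spec_check_bool_pgia check_bool_pgia check_bool_pgia_alt
  obtain ⟨e, c, hA, hE, hC⟩ := pv_invariant s p hpre s.length le_rfl
  rw [pv_range_cast, hA, hE, hC]
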